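-- pv_equiv track=rewrite | github.com/irmalons/Practica1 | Practica1_opcional_ilimitado.py | minimo_val
-- ===== SOURCE A (Python) =====
-- def minimo_val(values): #función que dado el almacen values devuelve la posición y el valor del menor (sin tener en cuenta los -1)
--     aux=[]
--     for i in range(len(values)):
--     	if values[i]!=-1:
--     		aux.append(values[i])
--     men=min(aux)
--     for i in range(len(values)):
--     	if values[i]==men:
--     		ind=i
--     return ind,values[ind]
-- ===== SOURCE B (Python) =====
-- def minimo_val(values):
--     best = None
--     idx = -1
--     for i, v in enumerate(values):
--         if v == -1:
--             continue
--         if best is None or v < best: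
--             best, idx = v, i
--         elif v == best:
--             idx = i
--     if best is None:
--         raise ValueError("min() arg is an empty sequence")
--     return idx, values[idx]
-- ===== Notes on version B (the rewrite author's own statement) =====
-- stated objective: alternative
-- what changed: A makes three passes (build a filtered copy without -1, take min of it, rescan the whole list for the last index of that min); B is a single enumerate pass keeping the running minimum and the index of its last occurrence (overwriting the index on ties).
import Mathlib
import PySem

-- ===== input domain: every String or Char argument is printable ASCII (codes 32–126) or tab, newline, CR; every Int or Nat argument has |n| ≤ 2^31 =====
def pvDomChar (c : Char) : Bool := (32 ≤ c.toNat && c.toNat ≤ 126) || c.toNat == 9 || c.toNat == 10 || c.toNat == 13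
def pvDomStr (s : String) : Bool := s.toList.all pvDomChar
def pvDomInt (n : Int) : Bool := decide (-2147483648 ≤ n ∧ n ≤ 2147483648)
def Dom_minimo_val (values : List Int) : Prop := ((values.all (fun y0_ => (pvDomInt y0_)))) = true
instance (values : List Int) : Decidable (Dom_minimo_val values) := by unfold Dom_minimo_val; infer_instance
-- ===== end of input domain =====

-- B replaces A's three passes (filter, min, last-index rescan) by a single pass that
-- keeps the running minimum and the index of its last occurrence (objective: alternative).

-- ===== PORT A =====
def minimo_val (values : List Int) : Int × Int :=
  let aux := values.foldl (fun acc v => if v ≠ -1 then acc ++ [v] else acc) ([] : List Int)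
  match PySem.List.min? aux (fun x => x) with
  | none => (0, 0)  -- Python: min([]) raises ValueError; excluded by Pre_
  | some men =>
    match (PySem.List.enumerate values 0).foldl
        (fun (acc : Option Int) p => if p.2 = men then some p.1 else acc) none with
    | none => (0, 0)  -- Python: NameError on 'ind'; unreachable once min? succeeded
    | some ind => (ind, PySem.List.pyGetD values ind 0)

-- ===== PORT B =====
def minimo_val_alt (values : List Int) : Int × Int :=
  let st := (PySem.List.enumerate values 0).foldl
      (fun (acc : Option (Int × Int)) p =>
        if p.2 = -1 then acc
        else
          match acc with
          | none => some (p.2, p.1)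
          | some (b, j) =>
            if p.2 < b then some (p.2, p.1)
            else if p.2 = b then some (b, p.1)
            else some (b, j))
      none
  match st with
  | none => (0, 0)  -- Python: B raises ValueError here; excluded by Pre_
  | some (_, j) => (j, PySem.List.pyGetD values j 0)

-- ===== PRECONDITION & SPEC =====
-- Pre_ excludes exactly the inputs where both Pythons raise ValueError: all entries -1 (or empty).
def Pre_minimo_val (values : List Int) : Prop := ∃ v ∈ values, v ≠ -1
instance (values : List Int) : Decidable (Pre_minimo_val values) := by unfold Pre_minimo_val; infer_instance
def pvWitness_minimo_val : List Int := [3, -1, 3]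

def Spec_minimo_val (values : List Int) (out : Int × Int) : Prop := out = minimo_val_alt values
instance (values : List Int) (out : Int × Int) : Decidable (Spec_minimo_val values out) := by unfold Spec_minimo_val; infer_instance

-- ===== CLAIM (what is proved, stated in full; the proofs are below) =====
def Claim_equal_minimo_val : Prop := ∀ (values : List Int), Dom_minimo_val values → Pre_minimo_val values → Spec_minimo_val values (minimo_val values)

-- ===== LEMMAS AND PROOFS =====

-- A's second loop: last index (from start s) whose value equals m, else the initial acc.
def pvAfind (m : Int) (l : List Int) (s : Int) (acc : Option Int) : Option Int :=
  (PySem.List.enumerate l s).foldl (fun acc p => if p.2 = m then some p.1 else acc) acc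

-- B's single-pass loop body, as a named function of the remaining list.
def pvBfold (l : List Int) (s : Int) (acc : Option (Int × Int)) : Option (Int × Int) :=
  (PySem.List.enumerate l s).foldl
    (fun (acc : Option (Int × Int)) p =>
      if p.2 = -1 then acc
      else
        match acc with
        | none => some (p.2, p.1)
        | some (b, j) =>
          if p.2 < b then some (p.2, p.1)
          else if p.2 = b then some (b, p.1)
          else some (b, j))
    acc

def pvF (l : List Int) : List Int := l.filter (fun v => v ≠ -1)

theorem pvAfind_cons (m x : Int) (t : List Int) (s : Int) (acc : Option Int) :
    pvAfind m (x :: t) s acc = pvAfind m t (s + 1) (if x = m then some s else acc) := by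
  simp [pvAfind, PySem.List.enumerate_cons]

theorem pvBfold_cons (x : Int) (t : List Int) (s : Int) (acc : Option (Int × Int)) :
    pvBfold (x :: t) s acc = pvBfold t (s + 1)
      (if x = -1 then acc
       else
        match acc with
        | none => some (x, s)
        | some (b, j) =>
          if x < b then some (x, s)
          else if x = b then some (b, s)
          else some (b, j)) := by
  simp [pvBfold, PySem.List.enumerate_cons]

theorem pvAfind_congr (m : Int) (l : List Int) (s : Int) (a₁ a₂ : Option Int)
    (h : m ∈ l) : pvAfind m l s a₁ = pvAfind m l s a₂ := by
  induction l generalizing s a₁ a₂ with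
  | nil => cases h
  | cons x t ih =>
    rw [pvAfind_cons, pvAfind_cons]
    by_cases hm : m ∈ t
    · exact ih _ _ _ hm
    · have hx : x = m := by
        rcases List.mem_cons.mp h with h' | h'
        · exact h'.symm
        · exact absurd h' hm
      rw [if_pos hx, if_pos hx]

theorem pvAfind_init_switch (m x : Int) (t : List Int) (s j : Int) (a : Option Int)
    (hxm : m ∉ t → x = m) :
    pvAfind m t s (if x = m then some j else a) = pvAfind m t s (some j) := by
  by_cases hm : m ∈ t
  · exact pvAfind_congr _ _ _ _ _ hm
  · rw [if_pos (hxm hm)]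

theorem pvAfind_some (m : Int) (l : List Int) (s j : Int) :
    ∃ i, pvAfind m l s (some j) = some i := by
  induction l generalizing s j with
  | nil => exact ⟨j, rfl⟩
  | cons x t ih =>
    rw [pvAfind_cons]
    by_cases hx : x = m
    · rw [if_pos hx]; exact ih _ _
    · rw [if_neg hx]; exact ih _ _

-- the running minimum over the filtered list is never -1
theorem pvMin_ne_neg_one (l : List Int) (b : Int) (hb : b ≠ -1) :
    (pvF l).foldl min b ≠ -1 := by
  rcases PySem.List.foldl_min_mem (pvF l) b with h | h
  · rw [h]; exact hb
  · have := List.mem_filter.mp h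
    simpa using this.2

theorem pvMin_default (l : List Int) (b : Int) (hm : (pvF l).foldl min b ∉ l) :
    (pvF l).foldl min b = b := by
  rcases PySem.List.foldl_min_mem (pvF l) b with h | h
  · exact h
  · exact absurd (List.mem_filter.mp h).1 hm

-- B's loop from a live state (b, j): the value becomes the minimum of b and the
-- remaining filtered entries, and the index becomes A's last-index rescan started at j.
theorem pvBs (l : List Int) (s : Int) (b j : Int) (hb : b ≠ -1) :
    pvBfold l s (some (b, j)) =
      (pvAfind ((pvF l).foldl min b) l s (some j)).map (fun k => ((pvF l).foldl min b, k)) := by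
  induction l generalizing s b j with
  | nil => rfl
  | cons x t ih =>
    rw [pvBfold_cons, pvAfind_cons]
    by_cases hx : x = -1
    · rw [if_pos hx]
      have hF : pvF (x :: t) = pvF t := by simp [pvF, hx]
      rw [hF]
      have hm : (pvF t).foldl min b ≠ -1 := pvMin_ne_neg_one t b hb
      rw [if_neg (by rw [hx]; exact fun he => hm he.symm)]
      exact ih _ _ _ hb
    · rw [if_neg hx]
      have hF : pvF (x :: t) = x :: pvF t := by simp [pvF, hx]
      rw [hF]
      simp only [List.foldl_cons]
      by_cases h1 : x < b
      · have hmin : min b x = x := by omega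
        rw [if_pos h1]
        simp only [hmin]
        rw [ih (s + 1) x s hx,
          pvAfind_init_switch _ _ _ _ _ _ (fun hm => (pvMin_default t x hm).symm)]
      · rw [if_neg h1]
        by_cases h2 : x = b
        · have hmin : min b x = b := by omega
          rw [if_pos h2]
          simp only [hmin]
          rw [ih (s + 1) b s hb]
          have hxm : (pvF t).foldl min b ∉ t → x = (pvF t).foldl min b := by
            intro hm; rw [pvMin_default t b hm]; exact h2
          rw [pvAfind_init_switch _ _ _ _ _ _ hxm]
        · have hmin : min b x = b := by omega
          rw [if_neg h2]
          simp only [hmin]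
          rw [ih (s + 1) b j hb]
          have hne : x ≠ (pvF t).foldl min b := by
            have := (PySem.List.foldl_min_le (pvF t) b).1
            omega
          rw [if_neg hne]

-- B's loop from the empty state, phrased through A's quantities.
theorem pvBnone (l : List Int) (s : Int) :
    pvBfold l s none =
      (match pvF l with
       | [] => none
       | a :: rest =>
         (pvAfind (rest.foldl min a) l s none).map (fun k => (rest.foldl min a, k))) := by
  induction l generalizing s with
  | nil => rfl
  | cons x t ih =>
    rw [pvBfold_cons]
    by_cases hx : x = -1
    · rw [if_pos hx]
      have hF : pvF (x :: t) = pvF t := by simp [pvF, hx]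
      rw [hF, ih]
      cases hFt : pvF t with
      | nil => rfl
      | cons a rest =>
        have hm : rest.foldl min a ≠ -1 := by
          have h0 : (pvF t).foldl min a = rest.foldl min a := by rw [hFt]; simp
          have := pvMin_ne_neg_one t a (by
            have ha : a ∈ pvF t := by rw [hFt]; exact List.mem_cons_self
            simpa using (List.mem_filter.mp ha).2)
          rw [h0] at this; exact this
        simp only [pvAfind_cons]
        rw [if_neg (by rw [hx]; exact fun he => hm he.symm)]
    · rw [if_neg hx]
      have hF : pvF (x :: t) = x :: pvF t := by simp [pvF, hx]
      rw [hF, pvBs t (s + 1) x s hx]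
      change _ = Option.map (fun k => (List.foldl min x (pvF t), k))
        (pvAfind (List.foldl min x (pvF t)) (x :: t) s none)
      rw [pvAfind_cons,
        pvAfind_init_switch _ _ _ _ _ _ (fun hm => (pvMin_default t x hm).symm)]

-- A's first loop builds exactly the filtered list.
theorem pvAux_eq (values : List Int) :
    values.foldl (fun acc v => if v ≠ -1 then acc ++ [v] else acc) ([] : List Int) = pvF values := by
  rw [PySem.List.foldl_append_ite_eq_filter]
  rfl

-- ===== VERDICT (by name: the statement is the Claim_ definition above) =====
theorem minimo_val_spec : Claim_equal_minimo_val := by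
  intro values _ hpre
  unfold Spec_minimo_val minimo_val minimo_val_alt
  rw [pvAux_eq]
  have hne : pvF values ≠ [] := by
    rcases hpre with ⟨v, hv, hv1⟩
    intro h
    have : v ∈ pvF values := List.mem_filter.mpr ⟨hv, by simpa using hv1⟩
    rw [h] at this; cases this
  cases hFv : pvF values with
  | nil => exact absurd hFv hne
  | cons a rest =>
    simp only [PySem.List.min?_id_cons]
    have hB : pvBfold values 0 none =
        (pvAfind (rest.foldl min a) values 0 none).map (fun k => (rest.foldl min a, k)) := by
      rw [pvBnone, hFv]
    show (match pvAfind (rest.foldl min a) values 0 none with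
      | none => ((0 : Int), (0 : Int))
      | some ind => (ind, PySem.List.pyGetD values ind 0)) =
      (match pvBfold values 0 none with
      | none => ((0 : Int), (0 : Int))
      | some (_, j) => (j, PySem.List.pyGetD values j 0))
    rw [hB]
    have hmem : rest.foldl min a ∈ values := by
      have h1 : rest.foldl min a = a ∨ rest.foldl min a ∈ rest := PySem.List.foldl_min_mem rest a
      have hsub : ∀ y, y ∈ a :: rest → y ∈ values := by
        intro y hy
        have : y ∈ pvF values := by rw [hFv]; exact hy
        exact (List.mem_filter.mp this).1
      rcases h1 with h | h
      · exact hsub _ (by rw [h]; exact List.mem_cons_self)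
      · exact hsub _ (List.mem_cons_of_mem _ h)
    cases hA : pvAfind (rest.foldl min a) values 0 none with
    | none =>
      exfalso
      have h0 : pvAfind (rest.foldl min a) values 0 none =
          pvAfind (rest.foldl min a) values 0 (some 0) := pvAfind_congr _ _ _ _ _ hmem
      obtain ⟨i, hi⟩ := pvAfind_some (rest.foldl min a) values 0 0
      rw [hA, hi] at h0
      cases h0
    | some i => rfl
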